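-- pv_equiv track=rewrite | github.com/Erikcm99/Tkinter | TK10Autoaval.py | buscaSimbolos
-- ===== SOURCE A (Python) =====
-- def buscaSimbolos(texto: str):
--     for i, char in enumerate(texto[1:],1):
--         match (char):
--             case ("+"):
--                   return "+"
--             case ("-"):
--                   return "-"
--             case ("*"):
--                   return "*"
--             case ("/"):
--                   return "/"
--             case():
--                   return None
-- ===== SOURCE B (Python) =====
-- def buscaSimbolos(texto: str):
--     best = None
--     for sym in "+-*/":
--         pos = texto.find(sym, 1)
--         if pos != -1 and (best is None or pos < best[0]):
--             best = (pos, sym)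
--     return None if best is None else best[1]
-- ===== Notes on version B (the rewrite author's own statement) =====
-- stated objective: alternative
-- what changed: A's single left-to-right scan over texto[1:] is replaced by four indexed str.find(sym, 1) searches, one per operator symbol, followed by a min-over-positions selection of the earliest hit.
import Mathlib
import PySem

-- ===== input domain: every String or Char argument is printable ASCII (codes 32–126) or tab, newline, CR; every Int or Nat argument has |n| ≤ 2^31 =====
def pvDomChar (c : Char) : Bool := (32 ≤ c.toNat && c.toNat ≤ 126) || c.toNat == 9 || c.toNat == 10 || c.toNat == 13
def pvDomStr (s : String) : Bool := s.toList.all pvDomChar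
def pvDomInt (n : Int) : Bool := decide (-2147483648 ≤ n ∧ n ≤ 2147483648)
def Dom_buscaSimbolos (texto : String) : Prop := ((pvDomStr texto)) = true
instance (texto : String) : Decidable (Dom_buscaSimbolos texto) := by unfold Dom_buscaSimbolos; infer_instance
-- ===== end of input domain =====

-- B replaces A's single left-to-right scan of texto[1:] with four indexed str.find
-- searches (start=1) and a min-over-positions selection (objective: alternative).

-- ===== PORT A =====
-- texto[1:] is texto.toList.drop 1 (slice with nonnegative start, no stop — exact).
-- The enumerate index i is unused; the trailing `case ():` (empty-sequence pattern)
-- never matches a one-character string, so that branch is dead and the loop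
-- falls through, returning None implicitly.
def buscaSimbolosGo : List Char → Option String
  | [] => none
  | ch :: rest =>
    if ch = '+' then some "+"
    else if ch = '-' then some "-"
    else if ch = '*' then some "*"
    else if ch = '/' then some "/"
    else buscaSimbolosGo rest

def buscaSimbolos (texto : String) : Option String :=
  buscaSimbolosGo (texto.toList.drop 1)

-- ===== PORT B =====
-- one step of B's loop: pos = texto.find(sym, 1);
-- if pos != -1 and (best is None or pos < best[0]): best = (pos, sym)
def buscaSimbolosAltStep (texto : String) (best : Option (Int × Char)) (sym : Char) :
    Option (Int × Char) :=
  let pos := PySem.Str.findFrom texto (String.singleton sym) 1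
  match best with
  | none => if pos ≠ -1 then some (pos, sym) else none
  | some b => if pos ≠ -1 ∧ pos < b.1 then some (pos, sym) else some b

def buscaSimbolos_alt (texto : String) : Option String :=
  match ['+', '-', '*', '/'].foldl (buscaSimbolosAltStep texto) none with
  | none => none
  | some b => some (String.singleton b.2)

-- ===== PRECONDITION & SPEC =====
def Spec_buscaSimbolos (texto : String) (out : Option String) : Prop := out = buscaSimbolos_alt texto
instance (texto : String) (out : Option String) : Decidable (Spec_buscaSimbolos texto out) := by unfold Spec_buscaSimbolos; infer_instance

-- ===== CLAIM (what is proved, stated in full; the proofs are below) =====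
def Claim_equal_buscaSimbolos : Prop := ∀ (texto : String), Dom_buscaSimbolos texto → Spec_buscaSimbolos texto (buscaSimbolos texto)

-- ===== LEMMAS AND PROOFS =====

-- [c] is a prefix of l iff l starts with c
theorem pvSingle_prefix (c : Char) (l : List Char) : [c] <+: l ↔ ∃ r, l = c :: r := by
  constructor
  · rintro ⟨r, hr⟩; exact ⟨r, hr.symm⟩
  · rintro ⟨r, rfl⟩; exact ⟨r, rfl⟩

theorem pvSingle_infix (c : Char) (l : List Char) : [c] <:+: l ↔ c ∈ l := by
  constructor
  · intro h; exact h.subset (List.mem_singleton_self c)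
  · intro h
    obtain ⟨s, r, rfl⟩ := List.append_of_mem h
    exact ⟨s, r, by simp⟩

-- cons-recurrence for Chars.find on a singleton pattern
theorem pvFind_single_cons (a : Char) (t : List Char) (c : Char) :
    PySem.Chars.find (a :: t) [c] =
      if c = a then 0
      else if PySem.Chars.find t [c] = -1 then -1 else 1 + PySem.Chars.find t [c] := by
  split_ifs with h1 h2
  · -- c = a : first occurrence at 0
    subst h1
    have hinf : [c] <:+: (c :: t) := (pvSingle_infix c (c :: t)).2 (by simp)
    have h0 : 0 ≤ PySem.Chars.find (c :: t) [c] := (PySem.Chars.find_nonneg_iff _ _).2 hinf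
    obtain ⟨hpre, hmin⟩ := PySem.Chars.find_spec h0
    by_contra hne
    have hpos : 0 < (PySem.Chars.find (c :: t) [c]).toNat := by omega
    exact hmin 0 hpos ((pvSingle_prefix c _).2 ⟨t, rfl⟩)
  · -- c ∉ t and c ≠ a
    rw [PySem.Chars.find_eq_neg_one_iff] at h2 ⊢
    rw [pvSingle_infix] at h2 ⊢
    simp [h1, h2]
  · -- c ∈ t, c ≠ a : shift by one
    have hg : -1 ≤ PySem.Chars.find t [c] := PySem.Chars.neg_one_le_find t [c]
    have hg0 : 0 ≤ PySem.Chars.find t [c] := by omega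
    obtain ⟨hgpre, hgmin⟩ := PySem.Chars.find_spec hg0
    have hmem : c ∈ t := by
      have : [c] <:+: t := (PySem.Chars.find_nonneg_iff _ _).1 hg0
      exact (pvSingle_infix c t).1 this
    have hf0 : 0 ≤ PySem.Chars.find (a :: t) [c] :=
      (PySem.Chars.find_nonneg_iff _ _).2 ((pvSingle_infix c _).2 (by simp [hmem]))
    obtain ⟨hfpre, hfmin⟩ := PySem.Chars.find_spec hf0
    set f := PySem.Chars.find (a :: t) [c] with hfdef
    set g := PySem.Chars.find t [c] with hgdef
    -- f.toNat ≠ 0 since head a ≠ c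
    have hfne0 : f.toNat ≠ 0 := by
      intro h0
      rw [h0] at hfpre
      obtain ⟨r, hr⟩ := (pvSingle_prefix c _).1 hfpre
      simp at hr
      exact h1 hr.1.symm
    -- f.toNat ≤ g.toNat + 1 : prefix at g.toNat+1 in a::t
    have hub : f.toNat ≤ g.toNat + 1 := by
      by_contra hlt
      have : ¬ [c] <+: List.drop (g.toNat + 1) (a :: t) := hfmin _ (by omega)
      exact this (by simpa using hgpre)
    -- g.toNat ≤ f.toNat - 1 : prefix of t at f.toNat - 1
    have hlb : g.toNat ≤ f.toNat - 1 := by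
      by_contra hlt
      have hdrop : List.drop (f.toNat - 1) t = List.drop f.toNat (a :: t) := by
        obtain ⟨m, hm⟩ : ∃ m, f.toNat = m + 1 := ⟨f.toNat - 1, by omega⟩
        rw [hm, List.drop_succ_cons, Nat.add_sub_cancel]
      have : ¬ [c] <+: List.drop (f.toNat - 1) t := hgmin _ (by omega)
      exact this (by rw [hdrop]; exact hfpre)
    omega

theorem pvFind_nil_single (c : Char) : PySem.Chars.find ([] : List Char) [c] = -1 := by
  rw [PySem.Chars.find_eq_neg_one_iff, pvSingle_infix]; simp

-- the four operator characters
def pvOps : List Char := ['+', '-', '*', '/']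

-- A's scan versus the four find values: either no operator occurs (all finds -1),
-- or the returned operator's find value is nonnegative and strictly below the others'.
theorem pvGo_facts (t : List Char) :
    (buscaSimbolosGo t = none ∧ ∀ c ∈ pvOps, PySem.Chars.find t [c] = -1) ∨
    (∃ c ∈ pvOps, buscaSimbolosGo t = some (String.singleton c) ∧
      0 ≤ PySem.Chars.find t [c] ∧
      ∀ d ∈ pvOps, d ≠ c →
        (PySem.Chars.find t [d] = -1 ∨ PySem.Chars.find t [c] < PySem.Chars.find t [d])) := by
  induction t with
  | nil =>
    left
    exact ⟨rfl, fun c _ => pvFind_nil_single c⟩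
  | cons a t ih =>
    by_cases hop : a ∈ pvOps
    · right
      refine ⟨a, hop, ?_, ?_, ?_⟩
      · -- buscaSimbolosGo (a :: t) = some (String.singleton a)
        have : (a = '+' ∨ a = '-' ∨ a = '*' ∨ a = '/') := by simpa [pvOps] using hop
        rcases this with rfl | rfl | rfl | rfl <;> rfl
      · rw [pvFind_single_cons]; simp
      · intro d _ hne
        rw [pvFind_single_cons a t d, pvFind_single_cons a t a]
        have hg := PySem.Chars.neg_one_le_find t [d]
        simp only [if_neg hne]
        split_ifs with h
        · left; rfl
        · right; omega
    · -- head not an operator: shift everything by one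
      have hgo : buscaSimbolosGo (a :: t) = buscaSimbolosGo t := by
        have h1 : a ≠ '+' := by intro h; exact hop (by simp [pvOps, h])
        have h2 : a ≠ '-' := by intro h; exact hop (by simp [pvOps, h])
        have h3 : a ≠ '*' := by intro h; exact hop (by simp [pvOps, h])
        have h4 : a ≠ '/' := by intro h; exact hop (by simp [pvOps, h])
        simp [buscaSimbolosGo, h1, h2, h3, h4]
      have hne : ∀ e ∈ pvOps, e ≠ a := by
        intro e he h; exact hop (h ▸ he)
      rcases ih with ⟨hn, hall⟩ | ⟨c, hc, hsome, hpos, hcmp⟩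
      · left
        refine ⟨hgo.trans hn, fun e he => ?_⟩
        rw [pvFind_single_cons, if_neg (hne e he), hall e he]
        simp
      · right
        refine ⟨c, hc, hgo.trans hsome, ?_, ?_⟩
        · rw [pvFind_single_cons, if_neg (hne c hc)]
          split_ifs with h <;> omega
        · intro d hd hdc
          have := hcmp d hd hdc
          rw [pvFind_single_cons a t d, if_neg (hne d hd),
              pvFind_single_cons a t c, if_neg (hne c hc)]
          rcases this with h | h
          · left; simp [h]
          · right
            have hd1 := PySem.Chars.neg_one_le_find t [d]
            split_ifs with h1 h2 <;> omega

-- B's position for a symbol, at the list level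
def pvPos (l : List Char) (c : Char) : Int := PySem.Chars.findFrom l [c] 1 none

theorem pvPos_eq (a : Char) (t : List Char) (c : Char) :
    pvPos (a :: t) c =
      if PySem.Chars.find t [c] = -1 then -1 else 1 + PySem.Chars.find t [c] := by
  have h := PySem.Chars.findFrom_natCast (a :: t) [c] 1 (by simp)
  simpa [pvPos] using h

-- B's loop step with an abstract position function
def pvStep (pos : Char → Int) (best : Option (Int × Char)) (sym : Char) : Option (Int × Char) :=
  match best with
  | none => if pos sym ≠ -1 then some (pos sym, sym) else none
  | some b => if pos sym ≠ -1 ∧ pos sym < b.1 then some (pos sym, sym) else some b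

theorem pvStep_eq (texto : String) :
    buscaSimbolosAltStep texto = pvStep (pvPos texto.toList) := by
  funext best sym
  simp only [buscaSimbolosAltStep, pvStep, pvPos, PySem.Str.findFrom_eq, String.toList_singleton]

-- if no symbol occurs, the fold never moves off its accumulator
theorem pvFold_none (pos : Char → Int) :
    ∀ (syms : List Char) (acc : Option (Int × Char)),
      (∀ d ∈ syms, pos d = -1) → syms.foldl (pvStep pos) acc = acc := by
  intro syms
  induction syms with
  | nil => intro acc _; rfl
  | cons s rest ih =>
    intro acc h
    have hs : pos s = -1 := h s (by simp)
    have hstep : pvStep pos acc s = acc := by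
      cases acc <;> simp [pvStep, hs]
    rw [List.foldl_cons, hstep]
    exact ih acc (fun d hd => h d (by simp [hd]))

-- once the winner is in the accumulator it stays there
theorem pvFold_keep (pos : Char → Int) (c : Char) :
    ∀ (syms : List Char),
      (∀ d ∈ syms, d = c ∨ pos d = -1 ∨ pos c < pos d) →
      syms.foldl (pvStep pos) (some (pos c, c)) = some (pos c, c) := by
  intro syms
  induction syms with
  | nil => intro _; rfl
  | cons s rest ih =>
    intro h
    have hstep : pvStep pos (some (pos c, c)) s = some (pos c, c) := by
      rcases h s (by simp) with rfl | hs | hs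
      · simp [pvStep]
      · simp [pvStep, hs]
      · have hne : ¬(pos s ≠ -1 ∧ pos s < pos c) := by rintro ⟨-, hlt⟩; omega
        simp only [pvStep, if_neg hne]
    rw [List.foldl_cons, hstep]
    exact ih (fun d hd => h d (by simp [hd]))

-- the fold selects the symbol with the strictly smallest non-(-1) position
theorem pvFold_inv (pos : Char → Int) (c : Char) (hge : ∀ d, -1 ≤ pos d) (hc : pos c ≠ -1) :
    ∀ (syms : List Char) (acc : Option (Int × Char)),
      c ∈ syms →
      (∀ d ∈ syms, d ≠ c → pos d = -1 ∨ pos c < pos d) →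
      (acc = none ∨ ∃ d, acc = some (pos d, d) ∧ pos c < pos d) →
      syms.foldl (pvStep pos) acc = some (pos c, c) := by
  intro syms
  induction syms with
  | nil => intro acc h; exact absurd h (by simp)
  | cons s rest ih =>
    intro acc hmem hoth hacc
    by_cases hs : s = c
    · subst hs
      have hstep : pvStep pos acc s = some (pos s, s) := by
        rcases hacc with rfl | ⟨d, rfl, hlt⟩
        · simp [pvStep, hc]
        · simp only [pvStep, if_pos (show pos s ≠ -1 ∧ pos s < pos d from ⟨hc, hlt⟩)]
      rw [List.foldl_cons, hstep]
      exact pvFold_keep pos s rest (fun d hd => by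
        by_cases hdc : d = s
        · exact Or.inl hdc
        · exact Or.inr (hoth d (by simp [hd]) hdc))
    · have hmem' : c ∈ rest := by
        rcases List.mem_cons.1 hmem with h | h
        · exact absurd h.symm hs
        · exact h
      have hinv : pvStep pos acc s = none ∨
          ∃ d, pvStep pos acc s = some (pos d, d) ∧ pos c < pos d := by
        rcases hoth s (by simp) hs with h1 | h1
        · rcases hacc with rfl | ⟨d, rfl, hlt⟩
          · left; simp [pvStep, h1]
          · right; exact ⟨d, by simp [pvStep, h1], hlt⟩
        · rcases hacc with rfl | ⟨d, rfl, hlt⟩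
          · right
            refine ⟨s, ?_, h1⟩
            have hsne : pos s ≠ -1 := by have := hge c; omega
            simp only [pvStep, if_pos hsne]
          · by_cases h2 : pos s ≠ -1 ∧ pos s < pos d
            · right; exact ⟨s, by simp only [pvStep, if_pos h2], h1⟩
            · right; exact ⟨d, by simp only [pvStep, if_neg h2], hlt⟩
      rw [List.foldl_cons]
      exact ih _ hmem' (fun d hd hdc => hoth d (by simp [hd]) hdc) hinv

-- ===== VERDICT (by name: the statement is the Claim_ definition above) =====
theorem buscaSimbolos_spec : Claim_equal_buscaSimbolos := by
  intro texto _
  unfold Spec_buscaSimbolos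
  show buscaSimbolos texto = _
  unfold buscaSimbolos buscaSimbolos_alt
  rw [pvStep_eq]
  cases hl : texto.toList with
  | nil => decide
  | cons a t =>
    have hp : ∀ c, pvPos (a :: t) c =
        if PySem.Chars.find t [c] = -1 then -1 else 1 + PySem.Chars.find t [c] :=
      fun c => pvPos_eq a t c
    simp only [List.drop_succ_cons, List.drop_zero]
    rw [show (['+', '-', '*', '/'] : List Char) = pvOps from rfl]
    rcases pvGo_facts t with ⟨hn, hall⟩ | ⟨c, hc, hsome, hpos, hcmp⟩
    · rw [hn, pvFold_none (pvPos (a :: t)) pvOps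
        none (fun d hd => by rw [hp d, if_pos (hall d hd)])]
    · have hcne : pvPos (a :: t) c ≠ -1 := by
        rw [hp c]
        have := PySem.Chars.neg_one_le_find t [c]
        split_ifs with h <;> omega
      have hge : ∀ d, -1 ≤ pvPos (a :: t) d := fun d => by
        rw [hp d]
        have := PySem.Chars.neg_one_le_find t [d]
        split_ifs <;> omega
      rw [hsome, pvFold_inv (pvPos (a :: t)) c hge hcne pvOps none hc
        (fun d hd hdc => by
          rcases hcmp d hd hdc with h | h
          · left; rw [hp d, if_pos h]
          · right
            rw [hp d, hp c]
            have h1 := PySem.Chars.neg_one_le_find t [d]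
            split_ifs with h2 h3 <;> omega)
        (Or.inl rfl)]
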